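-- pv_equiv track=rewrite | github.com/SofiaDmytrenko/GUI-STM-STS | gui/helpers/metadata_tab.py | sort_metadata
-- ===== SOURCE A (Python) =====
-- def sort_metadata(attrs: dict) -> list:
--     keys = list(attrs.keys())
--     sorted_keys = []
--
--     # RHK_SessionText first
--     session_key = "RHK_SessionText"
--     if session_key in keys:
--         sorted_keys.append(session_key)
--         keys.remove(session_key)
--
--     # Move long values (>4 lines) to the end
--     long_value_keys = [
--         k for k in keys
--         if isinstance(attrs[k], str) and len(attrs[k].splitlines()) > 4
--     ]
--     keys = [k for k in keys if k not in long_value_keys]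
--
--     sorted_keys.extend(keys)
--     sorted_keys.extend(long_value_keys)
--
--     return [(k, attrs[k]) for k in sorted_keys]
-- ===== SOURCE B (Python) =====
-- def sort_metadata(attrs: dict) -> list:
--     # One stable sort by a 3-level rank: session key first, long (>4-line) string values last.
--     def rank(kv):
--         k, v = kv
--         if k == "RHK_SessionText":
--             return 0
--         if isinstance(v, str) and len(v.splitlines()) > 4:
--             return 2
--         return 1
--     return sorted(attrs.items(), key=rank)
-- ===== Notes on version B (the rewrite author's own statement) =====
-- stated objective: idiomatic
-- what changed: Replaces the extract/remove/two-comprehension partition (with its repeated membership scans and dict lookups) by a single stable sort of attrs.items() under a 3-valued rank (session key 0, long string values 2, rest 1).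
import Mathlib
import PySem

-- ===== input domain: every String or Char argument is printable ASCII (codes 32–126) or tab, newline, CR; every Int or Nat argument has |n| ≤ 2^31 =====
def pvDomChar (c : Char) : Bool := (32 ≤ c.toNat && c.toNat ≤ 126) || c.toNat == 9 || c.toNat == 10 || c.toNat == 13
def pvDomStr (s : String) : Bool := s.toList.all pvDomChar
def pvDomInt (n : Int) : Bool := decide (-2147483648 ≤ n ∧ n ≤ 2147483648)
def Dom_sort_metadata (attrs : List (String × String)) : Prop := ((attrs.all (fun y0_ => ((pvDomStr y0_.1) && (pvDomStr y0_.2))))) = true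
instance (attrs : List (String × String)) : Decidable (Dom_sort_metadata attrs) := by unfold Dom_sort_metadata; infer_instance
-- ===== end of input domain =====

-- B replaces A's extract/remove/two-comprehension partition by one stable sort under a
-- 3-valued rank (session key 0, long string values 2, rest 1); equal output on dict-like
-- (duplicate-free-key) inputs.


-- ===== PORT A =====
-- attrs[k]; in A, k is always drawn from attrs' keys, so the KeyError default "" is never reached
def pvVal (attrs : List (String × String)) (k : String) : String :=
  ((attrs.find? (fun p => p.1 == k)).map Prod.snd).getD ""

def sort_metadata (attrs : List (String × String)) : List (String × String) :=
  let keys := attrs.map Prod.fst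
  let session_key := "RHK_SessionText"
  -- if session_key in keys: sorted_keys.append(session_key); keys.remove(session_key)
  let sorted_keys : List String := if keys.contains session_key then [session_key] else []
  let keys := if keys.contains session_key then keys.erase session_key else keys
  -- long_value_keys = [k for k in keys if isinstance(attrs[k], str) and len(attrs[k].splitlines()) > 4]
  -- (values are str by type, so the isinstance test is True)
  let long_value_keys := keys.filter (fun k => 4 < (PySem.Str.splitlines (pvVal attrs k)).length)
  -- keys = [k for k in keys if k not in long_value_keys]
  let keys := keys.filter (fun k => !(long_value_keys.contains k))
  let sorted_keys := sorted_keys ++ keys ++ long_value_keys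
  sorted_keys.map (fun k => (k, pvVal attrs k))

-- ===== PORT B =====
def pvRank (kv : String × String) : Nat :=
  if kv.1 = "RHK_SessionText" then 0
  else if 4 < (PySem.Str.splitlines kv.2).length then 2
  else 1

def sort_metadata_alt (attrs : List (String × String)) : List (String × String) :=
  PySem.List.sorted attrs pvRank false

-- ===== PRECONDITION & SPEC =====
-- Pre_ excludes association lists with duplicate keys: they have no Python-dict counterpart
-- (a dict collapses duplicates before either function runs), so neither behaviour is A's to specify.
def Pre_sort_metadata (attrs : List (String × String)) : Prop :=
  (attrs.map Prod.fst).Nodup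
instance (attrs : List (String × String)) : Decidable (Pre_sort_metadata attrs) := by
  unfold Pre_sort_metadata; infer_instance

def pvWitness_sort_metadata : (List (String × String)) :=
  [("a", "1\n2\n3\n4\n5\n6"), ("RHK_SessionText", "s"), ("b", "x")]

def Spec_sort_metadata (attrs : List (String × String)) (out : List (String × String)) : Prop := out = sort_metadata_alt attrs
instance (attrs : List (String × String)) (out : List (String × String)) : Decidable (Spec_sort_metadata attrs out) := by unfold Spec_sort_metadata; infer_instance

-- ===== CLAIM (what is proved, stated in full; the proofs are below) =====
def Claim_equal_sort_metadata : Prop := ∀ (attrs : List (String × String)), Dom_sort_metadata attrs → Pre_sort_metadata attrs → Spec_sort_metadata attrs (sort_metadata attrs)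

-- ===== LEMMAS AND PROOFS =====

theorem pv_insertBy_nil {α : Type} (before : α → α → Bool) (x : α) :
    PySem.List.insertBy before x [] = [x] := rfl

theorem pv_insertBy_cons_of_before {α : Type} (before : α → α → Bool) (x b : α) (l : List α)
    (h : before x b = true) : PySem.List.insertBy before x (b :: l) = x :: b :: l := by
  simp [PySem.List.insertBy, h]

theorem pv_insertBy_cons_of_not_before {α : Type} (before : α → α → Bool) (x b : α) (l : List α)
    (h : before x b = false) :
    PySem.List.insertBy before x (b :: l) = b :: PySem.List.insertBy before x l := by
  simp [PySem.List.insertBy, h]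

theorem pv_insertBy_append_of_not_before {α : Type} (before : α → α → Bool) (x : α)
    (as bs : List α) (h : ∀ y ∈ as, before x y = false) :
    PySem.List.insertBy before x (as ++ bs) = as ++ PySem.List.insertBy before x bs := by
  induction as with
  | nil => simp
  | cons a t ih =>
      have ha : before x a = false := h a (by simp)
      simp only [List.cons_append, pv_insertBy_cons_of_not_before before x a _ ha]
      rw [ih (fun y hy => h y (by simp [hy]))]

theorem pvRank_le_two (kv : String × String) : pvRank kv ≤ 2 := by
  unfold pvRank; split_ifs <;> omega

-- stable sort by the 3-valued rank = the three rank buckets in original order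
theorem pv_sorted_buckets (xs : List (String × String)) :
    PySem.List.sorted xs pvRank false =
      xs.filter (fun kv => pvRank kv == 0) ++ xs.filter (fun kv => pvRank kv == 1)
        ++ xs.filter (fun kv => pvRank kv == 2) := by
  induction xs using List.reverseRecOn with
  | nil => rfl
  | append_singleton t x ih =>
      rw [PySem.List.sorted_eq_foldl_insertBy, List.foldl_append, ← PySem.List.sorted_eq_foldl_insertBy, ih]
      simp only [List.foldl_cons, List.foldl_nil, List.filter_append]
      have hf0 : ∀ y ∈ t.filter (fun kv => pvRank kv == 0), pvRank y = 0 := by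
        intro y hy; simpa using (List.mem_filter.mp hy).2
      have hf1 : ∀ y ∈ t.filter (fun kv => pvRank kv == 1), pvRank y = 1 := by
        intro y hy; simpa using (List.mem_filter.mp hy).2
      have hf2 : ∀ y ∈ t.filter (fun kv => pvRank kv == 2), pvRank y = 2 := by
        intro y hy; simpa using (List.mem_filter.mp hy).2
      have hx := pvRank_le_two x
      interval_cases h : pvRank x
      · -- rank 0: goes right after bucket 0
        rw [List.append_assoc, pv_insertBy_append_of_not_before _ _ _ _
              (fun y hy => by simp [h, hf0 y hy])]
        rcases h12 : (t.filter (fun kv => pvRank kv == 1) ++ t.filter (fun kv => pvRank kv == 2)) with _ | ⟨b, l⟩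
        · rcases List.append_eq_nil_iff.mp h12 with ⟨e1, e2⟩
          simp [e1, e2, pv_insertBy_nil, h]
        · have hb : pvRank b = 1 ∨ pvRank b = 2 := by
            have : b ∈ t.filter (fun kv => pvRank kv == 1) ++ t.filter (fun kv => pvRank kv == 2) := by
              rw [h12]; simp
            rcases List.mem_append.mp this with hb | hb
            · exact Or.inl (hf1 b hb)
            · exact Or.inr (hf2 b hb)
          have hbt : (decide (pvRank x < pvRank b)) = true := by
            rcases hb with hb | hb <;> simp [h, hb]
          rw [pv_insertBy_cons_of_before _ _ _ _ hbt, ← h12]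
          simp [h]
      · -- rank 1: after buckets 0 and 1
        rw [pv_insertBy_append_of_not_before _ _ _ _
              (fun y hy => by
                rcases List.mem_append.mp hy with hy | hy
                · simp [h, hf0 y hy]
                · simp [h, hf1 y hy])]
        rcases h2 : t.filter (fun kv => pvRank kv == 2) with _ | ⟨b, l⟩
        · simp [pv_insertBy_nil, h]
        · have hb : pvRank b = 2 := hf2 b (by rw [h2]; simp)
          have hbt : (decide (pvRank x < pvRank b)) = true := by simp [h, hb]
          rw [pv_insertBy_cons_of_before _ _ _ _ hbt, ← h2]
          simp [h]
      · -- rank 2: at the very end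
        rw [PySem.List.insertBy_of_forall_not_before _ _ _
              (fun y hy => by
                rcases List.mem_append.mp hy with hy | hy
                · rcases List.mem_append.mp hy with hy | hy
                  · simp [h, hf0 y hy]
                  · simp [h, hf1 y hy]
                · simp [h, hf2 y hy])]
        simp [h]

-- lookup of a member key in a duplicate-free association list
theorem pv_val_of_mem (attrs : List (String × String)) (hnd : (attrs.map Prod.fst).Nodup)
    (kv : String × String) (hm : kv ∈ attrs) : pvVal attrs kv.1 = kv.2 := by
  induction attrs with
  | nil => cases hm
  | cons hd t ih =>
      rw [List.map_cons, List.nodup_cons] at hnd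
      rcases List.mem_cons.mp hm with rfl | hm
      · simp [pvVal]
      · have hne : (hd.1 == kv.1) = false := by
          simp only [beq_eq_false_iff_ne]
          intro he; exact hnd.1 (he ▸ List.mem_map_of_mem hm)
        simpa [pvVal, List.find?_cons, hne] using ih hnd.2 hm

-- mapping (k, attrs[k]) over a filtered key list = filtering the assoc list itself
theorem pv_map_filter_keys (attrs : List (String × String))
    (hnd : (attrs.map Prod.fst).Nodup) (p : String → Bool) :
    ((attrs.map Prod.fst).filter p).map (fun k => (k, pvVal attrs k))
      = attrs.filter (fun kv => p kv.1) := by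
  induction attrs with
  | nil => rfl
  | cons hd t ih =>
      rw [List.map_cons, List.nodup_cons] at hnd
      have htail : ∀ k ∈ (t.map Prod.fst).filter p, pvVal (hd :: t) k = pvVal t k := by
        intro k hk
        have hkm : k ∈ t.map Prod.fst := (List.mem_filter.mp hk).1
        have hne : (hd.1 == k) = false := by
          simp only [beq_eq_false_iff_ne]
          exact fun he => hnd.1 (he ▸ hkm)
        simp [pvVal, hne]
      have hmap : ((t.map Prod.fst).filter p).map (fun k => (k, pvVal (hd :: t) k))
          = ((t.map Prod.fst).filter p).map (fun k => (k, pvVal t k)) :=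
        List.map_congr_left (fun k hk => by rw [htail k hk])
      by_cases hp : p hd.1
      · simp only [List.map_cons, List.filter_cons, hp, if_pos, List.map_cons]
        rw [show pvVal (hd :: t) hd.1 = hd.2 by simp [pvVal], hmap, ih hnd.2]
      · simp only [List.map_cons, List.filter_cons, hp, Bool.false_eq_true, if_false]
        rw [hmap, ih hnd.2]

theorem pv_filter_eq_self_of_mem_nodup (l : List String) (hnd : l.Nodup) (a : String)
    (ha : a ∈ l) : l.filter (fun k => k == a) = [a] := by
  induction l with
  | nil => cases ha
  | cons hd t ih =>
      rw [List.nodup_cons] at hnd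
      rcases List.mem_cons.mp ha with rfl | ha
      · have : t.filter (fun k => k == a) = [] := by
          rw [List.filter_eq_nil_iff]
          intro b hb
          simp only [beq_iff_eq]
          intro he; exact hnd.1 (he ▸ hb)
        simp [this]
      · have hne : hd ≠ a := fun he => hnd.1 (he ▸ ha)
        simp [hne, ih hnd.2 ha]

-- ===== VERDICT (by name: the statement is the Claim_ definition above) =====
theorem sort_metadata_spec : Claim_equal_sort_metadata := by
  intro attrs _ hnd
  unfold Spec_sort_metadata sort_metadata_alt
  rw [pv_sorted_buckets]
  unfold sort_metadata
  have hnd' : (attrs.map Prod.fst).Nodup := hnd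
  set s := "RHK_SessionText" with hs
  set longk : String → Bool := fun k => decide (4 < (PySem.Str.splitlines (pvVal attrs k)).length) with hlk
  set longv : String × String → Bool := fun kv => decide (4 < (PySem.Str.splitlines kv.2).length) with hlv
  -- bucket predicates in terms of the pair
  have hb0 : attrs.filter (fun kv => pvRank kv == 0) = attrs.filter (fun kv => kv.1 == s) := by
    apply List.filter_congr; intro kv _
    unfold pvRank; split_ifs <;> simp_all
  have hb1 : attrs.filter (fun kv => pvRank kv == 1)
      = attrs.filter (fun kv => (kv.1 != s) && !(longv kv)) := by
    apply List.filter_congr; intro kv _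
    rw [hlv]; unfold pvRank; split_ifs <;> simp_all
  have hb2 : attrs.filter (fun kv => pvRank kv == 2)
      = attrs.filter (fun kv => (kv.1 != s) && longv kv) := by
    apply List.filter_congr; intro kv _
    rw [hlv]; unfold pvRank; split_ifs <;> simp_all
  rw [hb0, hb1, hb2]
  -- rewrite attrs[k] to the pair's own value inside the long-value predicates
  have hval : ∀ p : String → Bool,
      attrs.filter (fun kv => p kv.1 && longk kv.1) = attrs.filter (fun kv => p kv.1 && longv kv) := by
    intro p; apply List.filter_congr; intro kv hkv
    simp only [hlk, hlv, pv_val_of_mem attrs hnd' kv hkv]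
  have hval' : ∀ p : String → Bool,
      attrs.filter (fun kv => p kv.1 && !(longk kv.1)) = attrs.filter (fun kv => p kv.1 && !(longv kv)) := by
    intro p; apply List.filter_congr; intro kv hkv
    simp only [hlk, hlv, pv_val_of_mem attrs hnd' kv hkv]
  by_cases hmem : (attrs.map Prod.fst).contains s
  · -- session key present
    have hm : s ∈ attrs.map Prod.fst := by simpa using hmem
    have herase : (attrs.map Prod.fst).erase s = (attrs.map Prod.fst).filter (fun k => k != s) :=
      hnd'.erase_eq_filter s
    simp only [hmem, if_pos, herase]
    set keys1 := (attrs.map Prod.fst).filter (fun k => k != s) with hk1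
    have hff : ∀ q : String → Bool,
        keys1.filter q = (attrs.map Prod.fst).filter (fun k => (k != s) && q k) := by
      intro q; rw [hk1, List.filter_filter]
      exact List.filter_congr (fun k _ => Bool.and_comm _ _)
    have hkeys2 : keys1.filter (fun k => !((keys1.filter longk).contains k))
        = keys1.filter (fun k => !(longk k)) := by
      apply List.filter_congr
      intro k hk
      by_cases hl : longk k
      · have hc : (keys1.filter longk).contains k = true := by
          simp only [List.contains_iff_mem]
          exact List.mem_filter.mpr ⟨hk, hl⟩
        rw [hc, hl]
      · have hc : k ∉ keys1.filter longk := fun hmem2 => hl (List.mem_filter.mp hmem2).2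
        simp [hc, hl]
    rw [hkeys2, hff (fun k => !(longk k)), hff longk]
    simp only [List.map_append]
    rw [pv_map_filter_keys attrs hnd' (fun k => (k != s) && !(longk k)),
        pv_map_filter_keys attrs hnd' (fun k => (k != s) && longk k)]
    rw [hval (fun k => k != s), hval' (fun k => k != s)]
    -- head: [s] maps to the session pair = bucket 0
    have hhead : attrs.filter (fun kv => kv.1 == s)
        = ((attrs.map Prod.fst).filter (fun k => k == s)).map (fun k => (k, pvVal attrs k)) := by
      rw [pv_map_filter_keys attrs hnd' (fun k => k == s)]
    rw [hhead, pv_filter_eq_self_of_mem_nodup _ hnd' s hm]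
  · -- session key absent
    have hm : s ∉ attrs.map Prod.fst := by simpa using hmem
    simp only [hmem, Bool.false_eq_true, if_false]
    have hne : ∀ kv ∈ attrs, kv.1 ≠ s := by
      intro kv hkv he; exact hm (he ▸ List.mem_map_of_mem hkv)
    have hb0' : attrs.filter (fun kv => kv.1 == s) = [] := by
      rw [List.filter_eq_nil_iff]
      intro kv hkv; simpa using hne kv hkv
    have hkeys2 : (attrs.map Prod.fst).filter
          (fun k => !((((attrs.map Prod.fst)).filter longk).contains k))
        = (attrs.map Prod.fst).filter (fun k => !(longk k)) := by
      apply List.filter_congr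
      intro k hk
      by_cases hl : longk k
      · have hc : ((attrs.map Prod.fst).filter longk).contains k = true := by
          simp only [List.contains_iff_mem]
          exact List.mem_filter.mpr ⟨hk, hl⟩
        rw [hc, hl]
      · have hc : k ∉ (attrs.map Prod.fst).filter longk := fun hmem2 => hl (List.mem_filter.mp hmem2).2
        simp [hc, hl]
    rw [hkeys2]
    simp only [List.map_append, List.nil_append]
    rw [pv_map_filter_keys attrs hnd' (fun k => !(longk k)),
        pv_map_filter_keys attrs hnd' longk]
    have h1 : attrs.filter (fun kv => !(longk kv.1))
        = attrs.filter (fun kv => (kv.1 != s) && !(longv kv)) := by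
      apply List.filter_congr
      intro kv hkv
      simp only [hlk, hlv, pv_val_of_mem attrs hnd' kv hkv]
      simp [hne kv hkv]
    have h2 : attrs.filter (fun kv => longk kv.1)
        = attrs.filter (fun kv => (kv.1 != s) && longv kv) := by
      apply List.filter_congr
      intro kv hkv
      simp only [hlk, hlv, pv_val_of_mem attrs hnd' kv hkv]
      simp [hne kv hkv]
    rw [h1, h2, hb0']
    simp
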